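-- pv_equiv track=rewrite | github.com/ULun666/Graph-Counselor | code/GraphReflectAgent.py | gemma_format_step
-- ===== SOURCE A (Python) =====
-- def gemma_format_step(step: str,content:str) -> str:
--     mid_ans_generated_text = step[0]["generated_text"].replace(content, '')
--     first_non_newline_index = 0
--     while first_non_newline_index < len(mid_ans_generated_text) and mid_ans_generated_text[first_non_newline_index] == '\n':
--         first_non_newline_index += 1
--     start_index = first_non_newline_index
--     newline_index = mid_ans_generated_text.find('\n', start_index)
--     if newline_index != -1:
--         mid_ans_generated_text = mid_ans_generated_text[start_index:newline_index]
--     return mid_ans_generated_text.strip()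
-- ===== SOURCE B (Python) =====
-- def gemma_format_step(step, content):
--     s = step[0]["generated_text"].replace(content, '')
--     for line in s.split('\n'):
--         if line != '':
--             return line.strip()
--     return ''
-- ===== Notes on version B (the rewrite author's own statement) =====
-- stated objective: simpler
-- what changed: Replaces A's index-based while loop over characters plus find/slice index arithmetic with splitting on '\n' and returning the first non-empty segment, stripped.
import Mathlib
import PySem

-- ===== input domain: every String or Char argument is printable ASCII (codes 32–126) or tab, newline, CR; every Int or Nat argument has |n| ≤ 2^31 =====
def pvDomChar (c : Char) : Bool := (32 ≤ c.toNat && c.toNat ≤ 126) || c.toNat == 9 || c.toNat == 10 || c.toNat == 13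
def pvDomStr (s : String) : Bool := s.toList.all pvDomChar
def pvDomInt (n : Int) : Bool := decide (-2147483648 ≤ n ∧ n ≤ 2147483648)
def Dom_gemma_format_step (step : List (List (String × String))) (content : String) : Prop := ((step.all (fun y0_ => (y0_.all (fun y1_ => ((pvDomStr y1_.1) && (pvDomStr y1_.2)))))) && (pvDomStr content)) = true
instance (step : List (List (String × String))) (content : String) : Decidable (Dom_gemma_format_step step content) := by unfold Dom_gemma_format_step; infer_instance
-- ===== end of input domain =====

-- B replaces A's character-index while loop and find/slice arithmetic by split('\n') + first
-- non-empty segment (objective: simpler); equal on all inputs where A returns (Pre_).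

-- ===== PORT A =====
-- the while loop "while i < len(s) and s[i] == '\n': i += 1", as the structural scan it performs
def pvSkipNL : List Char → Nat → Nat
  | [], i => i
  | c :: rest, i => if c == '\n' then pvSkipNL rest (i + 1) else i

def gemma_format_step (step : List (List (String × String))) (content : String) : String :=
  match PySem.List.pyGet? step 0 with
  | none => ""          -- IndexError: excluded by Pre_
  | some d =>
    match List.lookup "generated_text" d with
    | none => ""        -- KeyError: excluded by Pre_
    | some gt =>
      let mid := PySem.Str.replace gt content ""
      let start : Nat := pvSkipNL mid.toList 0
      let nl : Int := PySem.Str.findFrom mid "\n" (start : Int)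
      if nl != -1 then PySem.Str.strip (PySem.Str.slice mid (some (start : Int)) (some nl))
      else PySem.Str.strip mid

-- ===== PORT B =====
-- "for line in s.split('\n'): if line != '': return line.strip()" / "return ''"
def pvFirstLine : List String → String
  | [] => ""
  | l :: ls => if l != "" then PySem.Str.strip l else pvFirstLine ls

def gemma_format_step_alt (step : List (List (String × String))) (content : String) : String :=
  match (PySem.List.pyGet? step 0).bind (List.lookup "generated_text") with
  | none => ""          -- IndexError / KeyError: excluded by Pre_
  | some gt =>
    pvFirstLine ((PySem.Str.split? (PySem.Str.replace gt content "") "\n").getD [])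

-- ===== PRECONDITION & SPEC =====
-- A raises (IndexError/KeyError) iff step is empty or its first dict lacks "generated_text"
def Pre_gemma_format_step (step : List (List (String × String))) (content : String) : Prop :=
  step ≠ [] ∧ (List.lookup "generated_text" (step.headD [])).isSome = true
instance (step : List (List (String × String))) (content : String) : Decidable (Pre_gemma_format_step step content) := by unfold Pre_gemma_format_step; infer_instance
def pvWitness_gemma_format_step : (List (List (String × String))) × String :=
  ([[("generated_text", "\nhi there\nrest")]], "x")
def Spec_gemma_format_step (step : List (List (String × String))) (content : String) (out : String) : Prop := out = gemma_format_step_alt step content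
instance (step : List (List (String × String))) (content : String) (out : String) : Decidable (Spec_gemma_format_step step content out) := by unfold Spec_gemma_format_step; infer_instance

-- ===== CLAIM (what is proved, stated in full; the proofs are below) =====
def Claim_equal_gemma_format_step : Prop := ∀ (step : List (List (String × String))) (content : String), Dom_gemma_format_step step content → Pre_gemma_format_step step content → Spec_gemma_format_step step content (gemma_format_step step content)

-- ===== LEMMAS AND PROOFS =====

-- the common value both ports compute on the cleaned text
def pvSpec (cs : List Char) : List Char :=
  PySem.Chars.strip ((cs.dropWhile (· == '\n')).takeWhile (· != '\n'))

-- natural recursion computing s.split('\n')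
def nlSplit : List Char → List (List Char)
  | [] => [[]]
  | c :: rest =>
    if c = '\n' then [] :: nlSplit rest
    else match nlSplit rest with
      | [] => [[c]]
      | p :: ps => (c :: p) :: ps

lemma pvSkipNL_eq (cs : List Char) (i : Nat) :
    pvSkipNL cs i = i + (cs.takeWhile (· == '\n')).length := by
  induction cs generalizing i with
  | nil => simp [pvSkipNL]
  | cons c rest ih =>
    by_cases h : c = '\n' <;> simp [pvSkipNL, h, ih] <;> omega

lemma findgo_eq (t : List Char) (k : Nat) :
    PySem.Chars.find.go ['\n'] t k =
      if '\n' ∈ t then ((k : Int) + ((t.takeWhile (· != '\n')).length : Int)) else -1 := by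
  induction t generalizing k with
  | nil => simp [PySem.Chars.find.go]
  | cons c rest ih =>
    by_cases h : c = '\n'
    · simp [PySem.Chars.find.go, List.isPrefixOf, h]
    · have hb : ('\n' == c) = false := by simpa using (fun hh : '\n' = c => h hh.symm)
      have hbn : (c != '\n') = true := by simp [h]
      have hm : ('\n' ∈ c :: rest) ↔ ('\n' ∈ rest) := by
        constructor
        · intro hx
          rcases List.mem_cons.mp hx with h1 | h1
          · exact absurd h1.symm h
          · exact h1
        · exact fun hx => List.mem_cons_of_mem _ hx
      rw [show PySem.Chars.find.go ['\n'] (c :: rest) k = PySem.Chars.find.go ['\n'] rest (k + 1) by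
        simp [PySem.Chars.find.go, List.isPrefixOf, hb]]
      rw [ih]
      have ht : List.takeWhile (fun x => x != '\n') (c :: rest) =
          c :: List.takeWhile (fun x => x != '\n') rest := by simp [List.takeWhile, hbn]
      by_cases hmm : '\n' ∈ rest
      · simp only [if_pos hmm, if_pos (hm.mpr hmm), ht, List.length_cons]
        push_cast; ring
      · simp only [if_neg hmm, if_neg (fun hx => hmm (hm.mp hx))]

lemma lstrip_dropNL (cs : List Char) :
    PySem.Chars.lstrip (cs.dropWhile (· == '\n')) = PySem.Chars.lstrip cs := by
  induction cs with
  | nil => rfl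
  | cons c rest ih =>
    by_cases h : c = '\n'
    · have hs : PySem.Chars.isspace c = true := by subst h; decide
      simpa [List.dropWhile, h, PySem.Chars.lstrip, hs] using ih
    · have : (c == '\n') = false := by simp [h]
      simp [List.dropWhile, this]

lemma strip_dropNL (cs : List Char) :
    PySem.Chars.strip (cs.dropWhile (· == '\n')) = PySem.Chars.strip cs := by
  simp [PySem.Chars.strip, lstrip_dropNL]

lemma takeWhile_eq_self_of_not_mem (t : List Char) (h : '\n' ∉ t) :
    t.takeWhile (· != '\n') = t := by
  induction t with
  | nil => rfl
  | cons c rest ih =>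
    simp at h
    have hbn : (c != '\n') = true := by
      simpa using (fun hh : c = '\n' => h.1 hh.symm)
    simp [List.takeWhile, hbn, ih h.2]

lemma nlSplit_head (cs : List Char) :
    ∃ ps, nlSplit cs = (cs.takeWhile (· != '\n')) :: ps := by
  induction cs with
  | nil => exact ⟨[], rfl⟩
  | cons c rest ih =>
    obtain ⟨ps, hps⟩ := ih
    by_cases h : c = '\n'
    · exact ⟨nlSplit rest, by simp [nlSplit, h, List.takeWhile]⟩
    · have hbn : (c != '\n') = true := by simp [h]
      exact ⟨ps, by simp [nlSplit, h, hps, List.takeWhile, hbn]⟩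

lemma splitOn_go_eq (fuel : Nat) (l cur : List Char) (acc : List (List Char)) (h : l.length ≤ fuel) :
    PySem.Chars.splitOn.go ['\n'] fuel l cur acc =
      acc.reverse ++ (match nlSplit l with
        | [] => [cur.reverse]
        | p :: ps => (cur.reverse ++ p) :: ps) := by
  induction fuel generalizing l cur acc with
  | zero =>
    have : l = [] := by cases l <;> simp_all
    subst this
    simp [PySem.Chars.splitOn.go, nlSplit]
  | succ fuel ih =>
    cases l with
    | nil => simp [PySem.Chars.splitOn.go, nlSplit]
    | cons c rest =>
      simp at h
      by_cases hc : c = '\n'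
      · have : List.isPrefixOf ['\n'] (c :: rest) = true := by simp [List.isPrefixOf, hc]
        rw [show PySem.Chars.splitOn.go ['\n'] (fuel + 1) (c :: rest) cur acc =
            PySem.Chars.splitOn.go ['\n'] fuel (List.drop 1 (c :: rest)) [] (cur.reverse :: acc) by
          simp [PySem.Chars.splitOn.go, this]]
        rw [ih _ _ _ (by simpa using h)]
        obtain ⟨ps, hps⟩ := nlSplit_head rest
        simp [nlSplit, hc, hps]
      · have : List.isPrefixOf ['\n'] (c :: rest) = false := by
          simpa [List.isPrefixOf] using (fun hh : '\n' = c => hc hh.symm)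
        rw [show PySem.Chars.splitOn.go ['\n'] (fuel + 1) (c :: rest) cur acc =
            PySem.Chars.splitOn.go ['\n'] fuel rest (c :: cur) acc by
          simp [PySem.Chars.splitOn.go, this]]
        rw [ih _ _ _ (by omega)]
        obtain ⟨ps, hps⟩ := nlSplit_head rest
        simp [nlSplit, hc, hps]

lemma splitOn_eq_nlSplit (cs : List Char) :
    PySem.Chars.splitOn cs ['\n'] = nlSplit cs := by
  rw [PySem.Chars.splitOn, splitOn_go_eq _ _ _ _ (by omega)]
  obtain ⟨ps, hps⟩ := nlSplit_head cs
  simp [hps]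

lemma pvStrip_ofList (l : List Char) :
    PySem.Str.strip (String.ofList l) = String.ofList (PySem.Chars.strip l) := by
  apply String.toList_inj.mp
  simp [PySem.Str.toList_strip]

lemma B_chars (cs : List Char) :
    pvFirstLine ((nlSplit cs).map String.ofList) = String.ofList (pvSpec cs) := by
  induction cs with
  | nil => simp [nlSplit, pvFirstLine, pvSpec]; rfl
  | cons c rest ih =>
    by_cases h : c = '\n'
    · have : (String.ofList ([] : List Char)) = "" := rfl
      simp [nlSplit, h, pvFirstLine, this, ih, pvSpec, List.dropWhile]
    · obtain ⟨ps, hps⟩ := nlSplit_head rest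
      have hbc : (c == '\n') = false := by simp [h]
      have hbn : (c != '\n') = true := by simp [h]
      have hne : String.ofList (c :: rest.takeWhile (· != '\n')) ≠ "" := by
        intro hcontra
        have := congrArg String.toList hcontra
        simp at this
      simp [nlSplit, h, hps, pvFirstLine, hne, pvSpec, List.dropWhile, hbc,
        List.takeWhile, hbn, pvStrip_ofList]

lemma A_eq_B (mid : String) :
    (if (PySem.Str.findFrom mid "\n" ((pvSkipNL mid.toList 0 : Nat) : Int) != -1) = true then
       PySem.Str.strip (PySem.Str.slice mid (some ((pvSkipNL mid.toList 0 : Nat) : Int))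
         (some (PySem.Str.findFrom mid "\n" ((pvSkipNL mid.toList 0 : Nat) : Int))))
     else PySem.Str.strip mid)
    = pvFirstLine ((PySem.Str.split? mid "\n").getD []) := by
  -- B side
  have hB : pvFirstLine ((PySem.Str.split? mid "\n").getD [])
      = String.ofList (pvSpec mid.toList) := by
    have : PySem.Str.split? mid "\n"
        = some ((PySem.Chars.splitOn mid.toList ['\n']).map String.ofList) := by
      simp [PySem.Str.split?, PySem.Chars.split?]
    rw [this]
    simp only [Option.getD_some, splitOn_eq_nlSplit]
    exact B_chars mid.toList
  -- A side
  set cs := mid.toList with hcs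
  have hk : pvSkipNL cs 0 = (cs.takeWhile (· == '\n')).length := by
    simpa using pvSkipNL_eq cs 0
  have hklen : (cs.takeWhile (· == '\n')).length ≤ cs.length :=
    (List.takeWhile_prefix _).length_le
  have hdrop : List.drop (cs.takeWhile (· == '\n')).length cs = cs.dropWhile (· == '\n') := by
    have h2 := List.drop_left (l₁ := cs.takeWhile (· == '\n')) (l₂ := cs.dropWhile (· == '\n'))
    rwa [List.takeWhile_append_dropWhile] at h2
  have hfind : PySem.Chars.find (cs.dropWhile (· == '\n')) ['\n']
      = if '\n' ∈ cs.dropWhile (· == '\n')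
        then (((cs.dropWhile (· == '\n')).takeWhile (· != '\n')).length : Int) else -1 := by
    have := findgo_eq (cs.dropWhile (· == '\n')) 0
    simpa [PySem.Chars.find] using this
  have hff : PySem.Str.findFrom mid "\n" ((pvSkipNL cs 0 : Nat) : Int)
      = PySem.Chars.findFrom cs ['\n'] ((pvSkipNL cs 0 : Nat) : Int) := rfl
  rw [hB, hff, hk]
  rw [PySem.Chars.findFrom_natCast cs ['\n'] _ hklen, hdrop, hfind]
  by_cases hm : '\n' ∈ cs.dropWhile (· == '\n')
  · have hpos : (((cs.dropWhile (· == '\n')).takeWhile (· != '\n')).length : Int) ≠ -1 := by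
      omega
    simp only [if_pos hm, if_neg hpos]
    have hne2 : (((cs.takeWhile (· == '\n')).length : Int)
        + (((cs.dropWhile (· == '\n')).takeWhile (· != '\n')).length : Int)) ≠ -1 := by omega
    rw [if_pos (by simpa using hne2)]
    have hslice : PySem.Str.slice mid (some ((cs.takeWhile (· == '\n')).length : Int))
        (some (((cs.takeWhile (· == '\n')).length : Int)
          + (((cs.dropWhile (· == '\n')).takeWhile (· != '\n')).length : Int)))
        = String.ofList ((cs.dropWhile (· == '\n')).takeWhile (· != '\n')) := by
      apply String.toList_inj.mp
      rw [PySem.Str.toList_slice]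
      simp only [PySem.Chars.slice, ← hcs]
      rw [show (((cs.takeWhile (· == '\n')).length : Int)
          + (((cs.dropWhile (· == '\n')).takeWhile (· != '\n')).length : Int))
          = (((cs.takeWhile (· == '\n')).length
            + ((cs.dropWhile (· == '\n')).takeWhile (· != '\n')).length : Nat) : Int) by
        push_cast; ring]
      rw [PySem.List.slice_natCast]
      rw [hdrop]
      have : (cs.takeWhile (· == '\n')).length
          + ((cs.dropWhile (· == '\n')).takeWhile (· != '\n')).length
          - (cs.takeWhile (· == '\n')).length
          = ((cs.dropWhile (· == '\n')).takeWhile (· != '\n')).length := by omega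
      rw [this]
      rw [← (List.prefix_iff_eq_take).mp (List.takeWhile_prefix _)]
      simp
    rw [hslice, pvStrip_ofList]
    rfl
  · rw [if_neg hm]
    have h1 : (if (-1 : Int) = -1 then (-1 : Int)
        else ((cs.takeWhile (· == '\n')).length : Int) + -1) = -1 := by norm_num
    rw [h1]
    have h2 : (((-1 : Int)) != -1) = false := by decide
    rw [h2]
    simp only [Bool.false_eq_true, if_false]
    show PySem.Str.strip mid = String.ofList (pvSpec cs)
    rw [show PySem.Str.strip mid = String.ofList (PySem.Chars.strip cs) from rfl]
    unfold pvSpec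
    rw [takeWhile_eq_self_of_not_mem _ hm, strip_dropNL]

-- ===== VERDICT (by name: the statement is the Claim_ definition above) =====
theorem gemma_format_step_spec : Claim_equal_gemma_format_step := by
  intro step content _hdom _hpre
  unfold Spec_gemma_format_step gemma_format_step gemma_format_step_alt
  cases hg : PySem.List.pyGet? step 0 with
  | none => rfl
  | some d =>
    cases hl : List.lookup "generated_text" d with
    | none => simp only [Option.bind_some, hl]
    | some gt =>
      simp only [Option.bind_some, hl]
      exact A_eq_B (PySem.Str.replace gt content "")
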